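-- pv_equiv track=rewrite | github.com/root-not-sudo/pyplay | Code Fights/Arcade/The Core/08 - Mirror Lake/61 - Create Anagram.py | createAnagram
-- ===== SOURCE A (Python) =====
-- from collections import Counter
--
-- def createAnagram(s, t):
--
--     s_count = Counter(s)
--     t_count = Counter(t)
--     tot = 0
--     for key in s_count:
--         if s_count[key] - t_count[key] > 0:
--             tot += s_count[key] - t_count[key]
--     return tot
-- ===== SOURCE B (Python) =====
-- def createAnagram(s, t):
--     remaining = list(t)
--     tot = 0
--     for c in s:
--         if c in remaining:
--             remaining.remove(c)
--         else:
--             tot += 1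
--     return tot
-- ===== Notes on version B (the rewrite author's own statement) =====
-- stated objective: alternative
-- what changed: B drops the Counter dictionaries entirely: it greedily matches each character of s against a mutable working copy of t, removing the first occurrence on a match and counting the unmatched characters.
import Mathlib
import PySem

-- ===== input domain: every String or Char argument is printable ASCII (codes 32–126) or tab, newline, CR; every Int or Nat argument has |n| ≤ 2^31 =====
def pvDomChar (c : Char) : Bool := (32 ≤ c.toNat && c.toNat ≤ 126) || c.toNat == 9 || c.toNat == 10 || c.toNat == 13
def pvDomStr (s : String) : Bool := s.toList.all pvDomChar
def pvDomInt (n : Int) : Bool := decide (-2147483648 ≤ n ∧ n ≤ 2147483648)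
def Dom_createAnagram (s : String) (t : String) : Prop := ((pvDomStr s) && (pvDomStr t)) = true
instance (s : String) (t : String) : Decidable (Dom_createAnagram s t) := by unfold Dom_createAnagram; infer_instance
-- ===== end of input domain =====

-- B replaces A's Counter-based positive-excess sum by greedy matching: it walks s,
-- removing each matched character from a working copy of t and counting the unmatched
-- ones — an alternative algorithm with no counting dictionaries (O(|s|·|t|) vs O(|s|+|t|)).

-- ===== PORT A =====
def createAnagram (s : String) (t : String) : Int :=
  let s_count := PySem.Dict.counter s.toList
  let t_count := PySem.Dict.counter t.toList
  s_count.keys.foldl (fun tot key =>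
    if s_count.getD key 0 - t_count.getD key 0 > 0 then
      tot + (s_count.getD key 0 - t_count.getD key 0)
    else tot) 0

-- ===== PORT B =====
-- the for-loop of Source B over the characters of s, carrying (remaining, tot);
-- 'remaining.remove(c)' after the membership test is exactly List.erase (first occurrence)
def pvAltLoop : List Char → List Char → Int → Int
  | [], _, tot => tot
  | c :: cs, rem, tot =>
    if c ∈ rem then pvAltLoop cs (rem.erase c) tot
    else pvAltLoop cs rem (tot + 1)

def createAnagram_alt (s : String) (t : String) : Int :=
  pvAltLoop s.toList t.toList 0

-- ===== PRECONDITION & SPEC =====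
def Spec_createAnagram (s : String) (t : String) (out : Int) : Prop := out = createAnagram_alt s t
instance (s : String) (t : String) (out : Int) : Decidable (Spec_createAnagram s t out) := by unfold Spec_createAnagram; infer_instance

-- ===== CLAIM (what is proved, stated in full; the proofs are below) =====
def Claim_equal_createAnagram : Prop := ∀ (s : String) (t : String), Dom_createAnagram s t → Spec_createAnagram s t (createAnagram s t)

-- ===== LEMMAS AND PROOFS =====

-- the distinct elements of cs, in first-occurrence order, are a permutation of Mathlib's dedup
lemma ofList_perm_dedup (cs : List Char) : (PySem.Set.ofList cs).Perm cs.dedup := by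
  apply List.perm_of_nodup_nodup_toFinset_eq (PySem.Set.nodup_ofList cs) cs.nodup_dedup
  ext x
  simp [PySem.Set.mem_ofList]

-- summing each distinct character's count recovers the length
lemma sum_count_ofList (cs : List Char) :
    ((PySem.Set.ofList cs).map (fun k => (cs.count k : Int))).sum = (cs.length : Int) := by
  have h := ((ofList_perm_dedup cs).map (fun k => (cs.count k : Int))).sum_eq
  rw [h]
  have h2 := List.sum_map_count_dedup_eq_length cs
  rw [← h2, Nat.cast_list_sum, List.map_map]
  rfl

-- per-key: the positive excess equals count minus the min, summed over the distinct keys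
lemma excess_sum (cs ct : List Char) (K : List Char) :
    (K.map (fun k => if ((cs.count k : Int) - (ct.count k : Int)) > 0
        then (cs.count k : Int) - (ct.count k : Int) else 0)).sum
      = (K.map (fun k => (cs.count k : Int))).sum
        - (K.map (fun k => min (cs.count k : Int) (ct.count k : Int))).sum := by
  induction K with
  | nil => simp
  | cons k K ih =>
    simp only [List.map_cons, List.sum_cons, ih]
    have h1 : (0:Int) ≤ (cs.count k : Int) := Int.natCast_nonneg _
    have h2 : (0:Int) ≤ (ct.count k : Int) := Int.natCast_nonneg _
    split_ifs with h <;> omega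

-- summing the per-character minima over the distinct characters of cs is the
-- cardinality of the multiset intersection
lemma sum_min_eq_inter_card (cs ct : List Char) :
    ((PySem.Set.ofList cs).map (fun k => min (cs.count k : Int) (ct.count k : Int))).sum
      = ((((cs : Multiset Char)) ∩ (ct : Multiset Char)).card : Int) := by
  have hperm := ((ofList_perm_dedup cs).map
      (fun k => min (cs.count k : Int) (ct.count k : Int))).sum_eq
  rw [hperm]
  have hcast : (fun k => min (cs.count k : Int) (ct.count k : Int))
      = (fun k => ((min (cs.count k) (ct.count k) : ℕ) : Int)) := by
    funext k; push_cast; ring_nf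
  rw [hcast]
  have hnat : (cs.dedup.map (fun k => min (cs.count k) (ct.count k))).sum
      = ((cs : Multiset Char) ∩ (ct : Multiset Char)).card := by
    have hfin : cs.dedup.toFinset.sum (fun k => min (cs.count k) (ct.count k))
        = (cs.dedup.map (fun k => min (cs.count k) (ct.count k))).sum :=
      List.sum_toFinset _ cs.nodup_dedup
    rw [← hfin]
    have htf : cs.dedup.toFinset = ((cs : Multiset Char)).toFinset := by
      ext x; simp
    rw [htf]
    have := Multiset.toFinset_sum_count_eq ((cs : Multiset Char) ∩ (ct : Multiset Char))
    rw [← this]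
    have hsub : ((cs : Multiset Char) ∩ (ct : Multiset Char)).toFinset
        ⊆ ((cs : Multiset Char)).toFinset := by
      intro x hx
      simp only [Multiset.mem_toFinset] at hx ⊢
      exact (Multiset.mem_inter.mp hx).1
    rw [Finset.sum_subset hsub]
    · apply Finset.sum_congr rfl
      intro x _
      simp [Multiset.coe_count]
    · intro x _ hx
      simp only [Multiset.mem_toFinset, Multiset.count_inter] at hx ⊢
      have : ((cs : Multiset Char) ∩ (ct : Multiset Char)).count x = 0 :=
        Multiset.count_eq_zero_of_notMem hx
      simpa [Multiset.count_inter, Multiset.coe_count] using this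
  rw [← hnat, Nat.cast_list_sum, List.map_map]
  rfl

-- loop invariant for B: the final total is tot plus the unmatched count,
-- i.e. |cs| minus the size of the multiset intersection with the remaining pool
lemma pvAltLoop_eq (cs : List Char) : ∀ (rem : List Char) (tot : Int),
    pvAltLoop cs rem tot
      = tot + (cs.length : Int) - ((((cs : Multiset Char)) ∩ (rem : Multiset Char)).card : Int) := by
  induction cs with
  | nil => intro rem tot; simp [pvAltLoop]
  | cons c cs ih =>
    intro rem tot
    by_cases h : c ∈ rem
    · rw [pvAltLoop, if_pos h, ih]
      have hm : c ∈ (rem : Multiset Char) := by simpa using h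
      rw [show ((c :: cs : List Char) : Multiset Char) = c ::ₘ (cs : Multiset Char) from rfl,
        Multiset.cons_inter_of_pos _ hm, Multiset.card_cons, ← Multiset.coe_erase]
      simp only [List.length_cons]
      push_cast
      ring
    · rw [pvAltLoop, if_neg h, ih]
      have hm : c ∉ (rem : Multiset Char) := by simpa using h
      rw [show ((c :: cs : List Char) : Multiset Char) = c ::ₘ (cs : Multiset Char) from rfl,
        Multiset.cons_inter_of_neg _ hm]
      simp only [List.length_cons]
      push_cast
      ring

-- ===== VERDICT (by name: the statement is the Claim_ definition above) =====
theorem createAnagram_spec : Claim_equal_createAnagram := by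
  intro s t _
  unfold Spec_createAnagram createAnagram createAnagram_alt
  simp only [PySem.Dict.keys_counter, PySem.Dict.getD_counter]
  set cs := s.toList with hcs
  set ct := t.toList with hct
  have hbody : (PySem.Set.ofList cs).foldl (fun tot key =>
      if (cs.count key : Int) - (ct.count key : Int) > 0 then
        tot + ((cs.count key : Int) - (ct.count key : Int)) else tot) 0
      = ((PySem.Set.ofList cs).map (fun k => if ((cs.count k : Int) - (ct.count k : Int)) > 0
          then (cs.count k : Int) - (ct.count k : Int) else 0)).sum := by
    have hfun : (fun (tot : Int) key =>
        if (cs.count key : Int) - (ct.count key : Int) > 0 then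
          tot + ((cs.count key : Int) - (ct.count key : Int)) else tot)
        = (fun (acc : Int) x => acc + (if ((cs.count x : Int) - (ct.count x : Int)) > 0
            then (cs.count x : Int) - (ct.count x : Int) else 0)) := by
      funext tot key
      split_ifs <;> omega
    rw [hfun, PySem.List.foldl_add, zero_add]
  rw [hbody, excess_sum cs ct (PySem.Set.ofList cs), sum_count_ofList cs,
    sum_min_eq_inter_card cs ct, pvAltLoop_eq cs ct 0]
  ring
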